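-- pv_equiv track=rewrite | github.com/hongpeng-guo/CrossRoI | optimizer2.py | rectangle_sets_from_start_end
-- ===== SOURCE A (Python) =====
-- def rectangle_sets_from_start_end(tile_shape, start, end):
-- 	assert(start % tile_shape[1] <= end % tile_shape[1])
--
-- 	total_set = set(list(range(tile_shape[0] * tile_shape[1])))
-- 	one_set, zero_set = set(), set()
-- 	for i in range(start, end+1):
-- 		if i % tile_shape[1] < start % tile_shape[1]:
-- 			continue
-- 		if i % tile_shape[1] > end % tile_shape[1]:
-- 			continue
-- 		one_set.add(i)
-- 	zero_set = total_set - one_set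
--
-- 	return one_set, zero_set
-- ===== SOURCE B (Python) =====
-- def rectangle_sets_from_start_end(tile_shape, start, end):
-- 	rows, cols = tile_shape
-- 	assert(start % cols <= end % cols)
--
-- 	one_set = {row * cols + col
-- 	           for row in range(start // cols, end // cols + 1)
-- 	           for col in range(start % cols, end % cols + 1)}
-- 	zero_set = {i for i in range(rows * cols) if i not in one_set}
-- 	return one_set, zero_set
-- ===== Notes on version B (the rewrite author's own statement) =====
-- stated objective: simpler
-- what changed: B computes the rectangle's row/column bounds with // and % and enumerates its tile indices directly with a nested set comprehension (row*cols+col), instead of A's scan of the entire flat range start..end filtering each index by modulo; Pre_ restricts to positive tile width (the natural domain of a tile grid) and to the assert's condition, excluding negative widths on which A's flat modulo scan still returns a value.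
-- outside the precondition, e.g. on rectangle_sets_from_start_end((2, -4), -8, -4): A returns ({-8, -4}, set()), B returns (set(), set())
import Mathlib
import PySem

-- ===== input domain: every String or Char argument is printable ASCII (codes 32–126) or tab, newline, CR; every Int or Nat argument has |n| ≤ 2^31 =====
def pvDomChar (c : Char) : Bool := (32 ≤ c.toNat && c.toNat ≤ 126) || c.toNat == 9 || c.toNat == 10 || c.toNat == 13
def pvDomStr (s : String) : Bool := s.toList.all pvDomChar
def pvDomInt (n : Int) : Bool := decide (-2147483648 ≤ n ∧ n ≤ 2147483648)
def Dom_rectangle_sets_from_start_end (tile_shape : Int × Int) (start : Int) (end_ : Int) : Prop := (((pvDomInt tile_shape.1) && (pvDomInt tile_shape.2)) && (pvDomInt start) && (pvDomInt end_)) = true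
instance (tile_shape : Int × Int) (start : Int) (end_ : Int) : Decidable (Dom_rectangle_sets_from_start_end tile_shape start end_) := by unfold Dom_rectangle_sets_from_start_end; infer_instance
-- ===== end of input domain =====

-- B enumerates the rectangle of tile indices directly from its row/column bounds with a nested
-- comprehension instead of scanning the whole flat range start..end and filtering by modulo
-- (objective: simpler).

-- ===== PORT A =====
def rectangle_sets_from_start_end (tile_shape : Int × Int) (start : Int) (end_ : Int) : List Int × List Int :=
  let total_set : PySem.Set Int := PySem.Set.ofList (PySem.List.pyRange 0 (tile_shape.1 * tile_shape.2) 1)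
  let one_set : PySem.Set Int :=
    (PySem.List.pyRange start (end_ + 1) 1).foldl (fun s i =>
      if PySem.Int.mod i tile_shape.2 < PySem.Int.mod start tile_shape.2 then s
      else if PySem.Int.mod end_ tile_shape.2 < PySem.Int.mod i tile_shape.2 then s
      else PySem.Set.add s i) PySem.Set.empty
  let zero_set : PySem.Set Int := PySem.Set.diff total_set one_set
  (one_set, zero_set)

-- ===== PORT B =====
def rectangle_sets_from_start_end_alt (tile_shape : Int × Int) (start : Int) (end_ : Int) : List Int × List Int :=
  let rows := tile_shape.1
  let cols := tile_shape.2
  let one_set : PySem.Set Int :=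
    (PySem.List.pyRange (PySem.Int.floordiv start cols) (PySem.Int.floordiv end_ cols + 1) 1).foldl
      (fun s row =>
        (PySem.List.pyRange (PySem.Int.mod start cols) (PySem.Int.mod end_ cols + 1) 1).foldl
          (fun s col => PySem.Set.add s (row * cols + col)) s) PySem.Set.empty
  let zero_set : PySem.Set Int :=
    (PySem.List.pyRange 0 (rows * cols) 1).foldl (fun s i =>
      if PySem.Set.contains one_set i then s else PySem.Set.add s i) PySem.Set.empty
  (one_set, zero_set)

-- ===== PRECONDITION & SPEC =====
-- Pre_ excludes the inputs on which A raises (tile_shape[1] = 0 gives ZeroDivisionError in the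
-- assert; start % tile_shape[1] > end % tile_shape[1] gives AssertionError) and, in addition,
-- negative tile widths tile_shape[1] < 0, which lie outside the natural domain of a tile grid
-- even though A's flat modulo scan still returns a value there.
def Pre_rectangle_sets_from_start_end (tile_shape : Int × Int) (start : Int) (end_ : Int) : Prop :=
  0 < tile_shape.2 ∧ PySem.Int.mod start tile_shape.2 ≤ PySem.Int.mod end_ tile_shape.2
instance (tile_shape : Int × Int) (start : Int) (end_ : Int) : Decidable (Pre_rectangle_sets_from_start_end tile_shape start end_) := by unfold Pre_rectangle_sets_from_start_end; infer_instance

def pvWitness_rectangle_sets_from_start_end : (Int × Int) × Int × Int := ((2, 3), 1, 4)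

def Spec_rectangle_sets_from_start_end (tile_shape : Int × Int) (start : Int) (end_ : Int) (out : List Int × List Int) : Prop := out = rectangle_sets_from_start_end_alt tile_shape start end_
instance (tile_shape : Int × Int) (start : Int) (end_ : Int) (out : List Int × List Int) : Decidable (Spec_rectangle_sets_from_start_end tile_shape start end_ out) := by unfold Spec_rectangle_sets_from_start_end; infer_instance

-- ===== CLAIM =====
def Claim_equal_rectangle_sets_from_start_end : Prop := ∀ (tile_shape : Int × Int) (start : Int) (end_ : Int), Dom_rectangle_sets_from_start_end tile_shape start end_ → Pre_rectangle_sets_from_start_end tile_shape start end_ → Spec_rectangle_sets_from_start_end tile_shape start end_ (rectangle_sets_from_start_end tile_shape start end_)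

-- ===== LEMMAS AND PROOFS =====

theorem pv_lower_pos {c sr sc q r : Int} (hc : 0 < c) (hsc : 0 ≤ sc) (hr : sc ≤ r) (hrc : r < c) :
    sr * c + sc ≤ q * c + r ↔ sr ≤ q := by
  constructor
  · intro h
    by_contra hq
    have h1 : q * c ≤ (sr - 1) * c := mul_le_mul_of_nonneg_right (by omega) hc.le
    have h2 : (sr - 1) * c = sr * c - c := by ring
    linarith
  · intro h
    have h1 : sr * c ≤ q * c := mul_le_mul_of_nonneg_right h hc.le
    linarith

theorem pv_upper_pos {c er ec q r : Int} (hc : 0 < c) (hec : ec < c) (hr : 0 ≤ r) (hrec : r ≤ ec) :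
    q * c + r ≤ er * c + ec ↔ q ≤ er := by
  constructor
  · intro h
    by_contra hq
    have h1 : (er + 1) * c ≤ q * c := mul_le_mul_of_nonneg_right (by omega) hc.le
    have h2 : (er + 1) * c = er * c + c := by ring
    linarith
  · intro h
    have h1 : q * c ≤ er * c := mul_le_mul_of_nonneg_right h hc.le
    linarith

theorem pv_fdiv_fmod_unique (a c q r : Int) (hc : 0 < c) (h : a = q * c + r)
    (hb : 0 ≤ r ∧ r < c) :
    PySem.Int.floordiv a c = q ∧ PySem.Int.mod a c = r := by
  have hid := PySem.Int.floordiv_mul_add_mod a c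
  set q' := PySem.Int.floordiv a c with hq'
  set r' := PySem.Int.mod a c with hr'
  have hb1 := PySem.Int.mod_nonneg a hc
  have hb2 := PySem.Int.mod_lt a hc
  have hqq : q' = q := by
    rcases lt_trichotomy q' q with hlt | heq | hgt
    · have h1 : (q' + 1) * c ≤ q * c := mul_le_mul_of_nonneg_right (by omega) hc.le
      have h2 : (q' + 1) * c = q' * c + c := by ring
      linarith
    · exact heq
    · have h1 : (q + 1) * c ≤ q' * c := mul_le_mul_of_nonneg_right (by omega) hc.le
      have h2 : (q + 1) * c = q * c + c := by ring
      linarith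
  refine ⟨hqq, ?_⟩
  have : q' * c + r' = q * c + r := by rw [hid, h]
  rw [hqq] at this
  linarith

theorem pv_add_fresh (s : List Int) (x : Int) (hx : x ∉ s) :
    PySem.Set.add s x = s ++ [x] := by
  have hc : PySem.Set.contains s x = false := by
    rw [← Bool.not_eq_true, PySem.Set.contains_iff]; exact hx
  unfold PySem.Set.add
  rw [hc]
  simp

theorem pv_foldl_skip_add (p q : Int → Prop) [DecidablePred p] [DecidablePred q] :
    ∀ (xs s : List Int), xs.Nodup → (∀ x ∈ xs, x ∉ s) →
      xs.foldl (fun s i => if p i then s else if q i then s else PySem.Set.add s i) s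
        = s ++ xs.filter (fun i => !(decide (p i)) && !(decide (q i))) := by
  intro xs
  induction xs with
  | nil => intro s _ _; simp
  | cons x xs ih =>
    intro s hnd hdisj
    by_cases hp : p x
    · rw [show List.filter (fun i => !(decide (p i)) && !(decide (q i))) (x :: xs)
          = List.filter (fun i => !(decide (p i)) && !(decide (q i))) xs by simp [hp]]
      simp only [List.foldl_cons, if_pos hp]
      exact ih s (List.nodup_cons.mp hnd).2 (fun y hy => hdisj y (List.mem_cons_of_mem _ hy))
    · by_cases hq : q x
      · rw [show List.filter (fun i => !(decide (p i)) && !(decide (q i))) (x :: xs)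
            = List.filter (fun i => !(decide (p i)) && !(decide (q i))) xs by simp [hq]]
        simp only [List.foldl_cons, if_neg hp, if_pos hq]
        exact ih s (List.nodup_cons.mp hnd).2 (fun y hy => hdisj y (List.mem_cons_of_mem _ hy))
      · have hfresh : x ∉ s := hdisj x List.mem_cons_self
        rw [show List.filter (fun i => !(decide (p i)) && !(decide (q i))) (x :: xs)
            = x :: List.filter (fun i => !(decide (p i)) && !(decide (q i))) xs by simp [hp, hq]]
        simp only [List.foldl_cons, if_neg hp, if_neg hq]
        rw [pv_add_fresh s x hfresh, ih (s ++ [x]) (List.nodup_cons.mp hnd).2 ?_]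
        · simp
        · intro y hy
          simp only [List.mem_append, List.mem_singleton]
          rintro (h | rfl)
          · exact hdisj y (List.mem_cons_of_mem _ hy) h
          · exact (List.nodup_cons.mp hnd).1 hy

theorem pv_foldl_add_map (f : Int → Int) :
    ∀ (ys s : List Int), (s ++ ys.map f).Nodup →
      ys.foldl (fun s r => PySem.Set.add s (f r)) s = s ++ ys.map f := by
  intro ys
  induction ys with
  | nil => intro s _; simp
  | cons y ys ih =>
    intro s hnd
    have hfresh : f y ∉ s := by
      intro h
      have := List.disjoint_of_nodup_append hnd h
      simp at this
    simp only [List.foldl_cons]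
    rw [pv_add_fresh s (f y) hfresh, ih (s ++ [f y]) (by simpa using hnd)]
    simp

theorem pv_foldl_nested_add (f : Int → Int → Int) (cols : List Int) :
    ∀ (rows s : List Int), (s ++ rows.flatMap (fun q => cols.map (f q))).Nodup →
      rows.foldl (fun s q => cols.foldl (fun s r => PySem.Set.add s (f q r)) s) s
        = s ++ rows.flatMap (fun q => cols.map (f q)) := by
  intro rows
  induction rows with
  | nil => intro s _; simp
  | cons q rows ih =>
    intro s hnd
    simp only [List.flatMap_cons, ← List.append_assoc] at hnd ⊢
    simp only [List.foldl_cons]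
    rw [pv_foldl_add_map (f q) cols s hnd.of_append_left,
      ih (s ++ cols.map (f q)) hnd]

theorem pv_foldl_if_not_add (p : Int → Bool) :
    ∀ (xs s : List Int), xs.Nodup → (∀ x ∈ xs, x ∉ s) →
      xs.foldl (fun s i => if p i then s else PySem.Set.add s i) s
        = s ++ xs.filter (fun i => !p i) := by
  intro xs
  induction xs with
  | nil => intro s _ _; simp
  | cons x xs ih =>
    intro s hnd hdisj
    by_cases hp : p x = true
    · rw [show List.filter (fun i => !p i) (x :: xs) = List.filter (fun i => !p i) xs by
        simp [hp]]
      simp only [List.foldl_cons, if_pos hp]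
      exact ih s (List.nodup_cons.mp hnd).2 (fun y hy => hdisj y (List.mem_cons_of_mem _ hy))
    · have hfresh : x ∉ s := hdisj x List.mem_cons_self
      rw [show List.filter (fun i => !p i) (x :: xs) = x :: List.filter (fun i => !p i) xs by
        simp [hp]]
      simp only [List.foldl_cons, if_neg hp]
      rw [pv_add_fresh s x hfresh, ih (s ++ [x]) (List.nodup_cons.mp hnd).2 ?_]
      · simp
      · intro y hy
        simp only [List.mem_append, List.mem_singleton]
        rintro (h | rfl)
        · exact hdisj y (List.mem_cons_of_mem _ hy) h
        · exact (List.nodup_cons.mp hnd).1 hy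

theorem pv_sorted_ext : ∀ (xs ys : List Int), xs.Pairwise (· < ·) → ys.Pairwise (· < ·) →
    (∀ a, a ∈ xs ↔ a ∈ ys) → xs = ys := by
  intro xs
  induction xs with
  | nil =>
    intro ys _ _ h
    cases ys with
    | nil => rfl
    | cons y ys => exact absurd ((h y).mpr List.mem_cons_self) (by simp)
  | cons x xs ih =>
    intro ys hx hy h
    cases ys with
    | nil => exact absurd ((h x).mp List.mem_cons_self) (by simp)
    | cons y ys =>
      have hxy : x = y := by
        by_contra hne
        have h1 : x ∈ y :: ys := (h x).mp List.mem_cons_self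
        have h2 : y ∈ x :: xs := (h y).mpr List.mem_cons_self
        rcases List.mem_cons.mp h1 with rfl | h1'
        · exact hne rfl
        rcases List.mem_cons.mp h2 with rfl | h2'
        · exact hne rfl
        have ha := (List.pairwise_cons.mp hy).1 x h1'
        have hb := (List.pairwise_cons.mp hx).1 y h2'
        omega
      subst hxy
      congr 1
      apply ih _ (List.pairwise_cons.mp hx).2 (List.pairwise_cons.mp hy).2
      intro a
      constructor
      · intro ha
        have hlt := (List.pairwise_cons.mp hx).1 a ha
        rcases List.mem_cons.mp ((h a).mp (List.mem_cons_of_mem _ ha)) with rfl | h'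
        · omega
        · exact h'
      · intro ha
        have hlt := (List.pairwise_cons.mp hy).1 a ha
        rcases List.mem_cons.mp ((h a).mpr (List.mem_cons_of_mem _ ha)) with rfl | h'
        · omega
        · exact h'

theorem pv_pairwise_flatMap (g : Int → List Int) :
    ∀ (rows : List Int), (∀ q ∈ rows, (g q).Pairwise (· < ·)) →
      rows.Pairwise (fun q1 q2 => ∀ x ∈ g q1, ∀ y ∈ g q2, x < y) →
      (rows.flatMap g).Pairwise (· < ·) := by
  intro rows
  induction rows with
  | nil => intro _ _; simp
  | cons q rows ih =>
    intro hblock hcross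
    simp only [List.flatMap_cons]
    rw [List.pairwise_append]
    refine ⟨hblock q List.mem_cons_self,
      ih (fun q' hq' => hblock q' (List.mem_cons_of_mem _ hq')) (List.pairwise_cons.mp hcross).2, ?_⟩
    intro x hx y hy
    obtain ⟨q2, hq2, hy2⟩ := List.mem_flatMap.mp hy
    exact (List.pairwise_cons.mp hcross).1 q2 hq2 x hx y hy2

theorem pv_oneA (c start end_ : Int) :
    (PySem.List.pyRange start (end_ + 1) 1).foldl (fun s i =>
      if PySem.Int.mod i c < PySem.Int.mod start c then s
      else if PySem.Int.mod end_ c < PySem.Int.mod i c then s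
      else PySem.Set.add s i) PySem.Set.empty
    = (PySem.List.pyRange start (end_ + 1) 1).filter
        (fun i => !(decide (PySem.Int.mod i c < PySem.Int.mod start c)) &&
                  !(decide (PySem.Int.mod end_ c < PySem.Int.mod i c))) := by
  have h := pv_foldl_skip_add (fun i => PySem.Int.mod i c < PySem.Int.mod start c)
    (fun i => PySem.Int.mod end_ c < PySem.Int.mod i c)
    (PySem.List.pyRange start (end_ + 1) 1) PySem.Set.empty
    (PySem.List.nodup_pyRange_one _ _) (by intro x _; simp [PySem.Set.empty])
  simpa using h

theorem pv_oneB (c sr stop sc ec : Int)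
    (hnd : ((PySem.List.pyRange sr stop 1).flatMap
        (fun q => (PySem.List.pyRange sc (ec + 1) 1).map (fun r => q * c + r))).Nodup) :
    (PySem.List.pyRange sr stop 1).foldl (fun s row =>
      (PySem.List.pyRange sc (ec + 1) 1).foldl (fun s col =>
        PySem.Set.add s (row * c + col)) s) PySem.Set.empty
    = (PySem.List.pyRange sr stop 1).flatMap
        (fun q => (PySem.List.pyRange sc (ec + 1) 1).map (fun r => q * c + r)) := by
  have h := pv_foldl_nested_add (fun q r => q * c + r) (PySem.List.pyRange sc (ec + 1) 1)
    (PySem.List.pyRange sr stop 1) PySem.Set.empty (by simpa [PySem.Set.empty] using hnd)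
  simpa using h

theorem pv_zeroB (one : List Int) (N : Int) :
    (PySem.List.pyRange 0 N 1).foldl (fun s i =>
      if PySem.Set.contains one i then s else PySem.Set.add s i) PySem.Set.empty
    = (PySem.List.pyRange 0 N 1).filter (fun i => !(PySem.Set.contains one i)) := by
  have h := pv_foldl_if_not_add (fun i => PySem.Set.contains one i)
    (PySem.List.pyRange 0 N 1) PySem.Set.empty
    (PySem.List.nodup_pyRange_one _ _) (by intro x _; simp [PySem.Set.empty])
  simpa using h

theorem pv_zeroA (one : List Int) (N : Int) :
    PySem.Set.diff (PySem.Set.ofList (PySem.List.pyRange 0 N 1)) one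
    = (PySem.List.pyRange 0 N 1).filter (fun i => !(PySem.Set.contains one i)) := by
  rw [PySem.Set.ofList_eq_self_of_nodup _ (PySem.List.nodup_pyRange_one _ _)]
  rfl

theorem pv_main : ∀ (tile_shape : Int × Int) (start : Int) (end_ : Int),
    0 < tile_shape.2 → PySem.Int.mod start tile_shape.2 ≤ PySem.Int.mod end_ tile_shape.2 →
    rectangle_sets_from_start_end tile_shape start end_
      = rectangle_sets_from_start_end_alt tile_shape start end_ := by
  rintro ⟨R, c⟩ start end_ hcpos hpre
  simp only at hcpos hpre
  have hc0 : c ≠ 0 := by omega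
  have hid := PySem.Int.floordiv_mul_add_mod start c
  have hide := PySem.Int.floordiv_mul_add_mod end_ c
  set sc := PySem.Int.mod start c with hsc
  set ec := PySem.Int.mod end_ c with hec
  set sr := PySem.Int.floordiv start c with hsr
  set er := PySem.Int.floordiv end_ c with her
  have hsc0 : 0 ≤ sc := PySem.Int.mod_nonneg start hcpos
  have hscc : sc < c := PySem.Int.mod_lt start hcpos
  have hec0 : 0 ≤ ec := PySem.Int.mod_nonneg end_ hcpos
  have hecc : ec < c := PySem.Int.mod_lt end_ hcpos
  set L1 := (PySem.List.pyRange start (end_ + 1) 1).filter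
      (fun i => !(decide (PySem.Int.mod i c < sc)) && !(decide (ec < PySem.Int.mod i c))) with hL1
  set L2 := (PySem.List.pyRange sr (er + 1) 1).flatMap
      (fun q => (PySem.List.pyRange sc (ec + 1) 1).map (fun r => q * c + r)) with hL2
  have hpw1 : L1.Pairwise (· < ·) :=
    List.Pairwise.filter _ (PySem.List.pairwise_lt_pyRange_one _ _)
  have hblock : ∀ q ∈ PySem.List.pyRange sr (er + 1) 1,
      ((PySem.List.pyRange sc (ec + 1) 1).map (fun r => q * c + r)).Pairwise (· < ·) := by
    intro q _
    refine List.Pairwise.map _ ?_ (PySem.List.pairwise_lt_pyRange_one _ _)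
    intro r1 r2 h; omega
  have hcross : (PySem.List.pyRange sr (er + 1) 1).Pairwise (fun q1 q2 =>
      ∀ x ∈ (PySem.List.pyRange sc (ec + 1) 1).map (fun r => q1 * c + r),
      ∀ y ∈ (PySem.List.pyRange sc (ec + 1) 1).map (fun r => q2 * c + r), x < y) := by
    refine (PySem.List.pairwise_lt_pyRange_one _ _).imp ?_
    intro q1 q2 hq x hx y hy
    obtain ⟨r1, hr1, rfl⟩ := List.mem_map.mp hx
    obtain ⟨r2, hr2, rfl⟩ := List.mem_map.mp hy
    rw [PySem.List.mem_pyRange_one] at hr1 hr2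
    have h1 : (q1 + 1) * c ≤ q2 * c := mul_le_mul_of_nonneg_right (by omega) hcpos.le
    have h2 : (q1 + 1) * c = q1 * c + c := by ring
    linarith
  have hpw2 : L2.Pairwise (· < ·) := pv_pairwise_flatMap _ _ hblock hcross
  have hmem : ∀ a, a ∈ L1 ↔ a ∈ L2 := by
    intro a
    rw [hL1, hL2]
    simp only [List.mem_filter, PySem.List.mem_pyRange_one, List.mem_flatMap, List.mem_map,
      Bool.and_eq_true, Bool.not_eq_true', decide_eq_false_iff_not, not_lt]
    constructor
    · rintro ⟨⟨h1, h2⟩, h3, h4⟩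
      have hida := PySem.Int.floordiv_mul_add_mod a c
      have hma1 : 0 ≤ PySem.Int.mod a c := PySem.Int.mod_nonneg a hcpos
      have hma2 : PySem.Int.mod a c < c := PySem.Int.mod_lt a hcpos
      refine ⟨PySem.Int.floordiv a c, ⟨?_, ?_⟩,
        PySem.Int.mod a c, ⟨by omega, by omega⟩, hida⟩
      · rw [← hid, ← hida] at h1
        exact (pv_lower_pos hcpos hsc0 h3 hma2).mp h1
      · have h2' : a ≤ end_ := by omega
        rw [← hide, ← hida] at h2'
        have := (pv_upper_pos hcpos hecc hma1 h4).mp h2'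
        omega
    · rintro ⟨q, ⟨hq1, hq2⟩, r, ⟨hr1, hr2⟩, rfl⟩
      obtain ⟨hfd, hfm⟩ := pv_fdiv_fmod_unique (q * c + r) c q r hcpos rfl
        ⟨by omega, by omega⟩
      refine ⟨⟨?_, ?_⟩, by rw [hfm]; omega, by rw [hfm]; omega⟩
      · rw [← hid]
        exact (pv_lower_pos hcpos hsc0 (by omega) (by omega)).mpr hq1
      · have : q * c + r ≤ end_ := by
          rw [← hide]
          exact (pv_upper_pos hcpos hecc (by omega) (by omega)).mpr (by omega)
        omega
  have heq : L1 = L2 := pv_sorted_ext _ _ hpw1 hpw2 hmem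
  have hnd2 : L2.Nodup := hpw2.imp (fun h => ne_of_lt h)
  simp only [rectangle_sets_from_start_end, rectangle_sets_from_start_end_alt]
  rw [pv_oneA c start end_]
  rw [pv_oneB c sr (er + 1) sc ec (by rw [← hL2]; exact hnd2)]
  rw [pv_zeroA, pv_zeroB, ← hL1, ← hL2, heq]

-- ===== VERDICT =====
theorem rectangle_sets_from_start_end_spec : Claim_equal_rectangle_sets_from_start_end := by
  intro tile_shape start end_ _ hpre
  exact pv_main tile_shape start end_ hpre.1 hpre.2
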